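-- pv_equiv track=rewrite | github.com/Joonsun-Hwang/coding-test-study-lamda | week4/menu_renewal/joonsun.py | filtering_course
-- ===== SOURCE A (Python) =====
-- def filtering_course(orders, course):
--     remove_idx = []
--     len_orders = list(map(len, orders))
--     for i, c in enumerate(course):
--         if sum([el >= c for el in len_orders]) < 2:
--             remove_idx.append(i)
--
--     for idx in sorted(remove_idx, reverse=True):
--         del course[idx]
--
--     return course
-- ===== SOURCE B (Python) =====
-- def filtering_course(orders, course):
--     # Sort the order lengths once; for each course length c, the number of
--     # orders with len >= c is n - bisect_left(lens, c) (hand-written binary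
--     # search, the standard bisect_left algorithm).  Keeps c iff that count >= 2.
--     # Note: A deletes from `course` in place and returns it; B returns a fresh
--     # list with the same value.
--     lens = sorted(len(o) for o in orders)
--     n = len(lens)
--
--     def bisect_left(a, x):
--         lo, hi = 0, len(a)
--         while lo < hi:
--             mid = (lo + hi) // 2
--             if a[mid] < x:
--                 lo = mid + 1
--             else:
--                 hi = mid
--         return lo
--
--     return [c for c in course if n - bisect_left(lens, c) >= 2]
-- ===== Notes on version B (the rewrite author's own statement) =====
-- stated objective: faster
-- what changed: Instead of scanning all order lengths once per course entry, B sorts the order lengths once and binary-searches (bisect_left) to count orders with length >= c for each course entry; A also mutates `course` in place while B builds a fresh list with the same value.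
import Mathlib
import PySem

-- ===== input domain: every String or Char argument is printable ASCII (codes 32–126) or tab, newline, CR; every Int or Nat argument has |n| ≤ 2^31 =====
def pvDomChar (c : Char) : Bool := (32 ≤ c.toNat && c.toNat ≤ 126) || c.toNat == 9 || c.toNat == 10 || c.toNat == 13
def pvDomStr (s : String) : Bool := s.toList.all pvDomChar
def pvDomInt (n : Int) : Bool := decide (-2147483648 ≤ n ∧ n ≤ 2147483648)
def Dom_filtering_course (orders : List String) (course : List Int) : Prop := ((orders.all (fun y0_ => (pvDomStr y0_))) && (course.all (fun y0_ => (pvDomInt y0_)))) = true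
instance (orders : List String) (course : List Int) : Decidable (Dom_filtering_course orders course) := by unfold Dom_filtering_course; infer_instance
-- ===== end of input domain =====

-- B replaces A's per-course scan of all order lengths by one sort + a binary search
-- (bisect_left) per course entry — asymptotically faster; A also mutates `course`
-- in place (del) and returns it, B returns a fresh list with the same value
-- (the equivalence proved here is about the return value).

-- ===== PORT A =====
def filtering_course (orders : List String) (course : List Int) : List Int :=
  let lenOrders : List Int := orders.map (fun o => (PySem.Str.len o : Int))
  let removeIdx : List Int :=
    (PySem.List.enumerate course).foldl
      (fun acc ic =>
        if (lenOrders.map (fun el => if el ≥ ic.2 then (1 : Int) else 0)).sum < 2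
        then acc ++ [ic.1] else acc) []
  -- 'del course[idx]' = pop at idx, keep the remainder; the indices produced above
  -- are always in range, so the .getD fallback is never taken on admitted inputs.
  (PySem.List.sorted removeIdx (fun x => x) true).foldl
    (fun cur idx => ((PySem.List.pop? cur idx).map Prod.snd).getD cur) course

-- ===== PORT B =====
-- Source B's hand-written bisect_left loop is exactly the standard bisect_left
-- algorithm; it is ported as the PySem primitive PySem.List.bisectLeft.
def filtering_course_alt (orders : List String) (course : List Int) : List Int :=
  let lens : List Int :=
    PySem.List.sorted (orders.map (fun o => (PySem.Str.len o : Int))) (fun x => x) false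
  let n : Int := lens.length
  course.filter (fun c => decide (n - (PySem.List.bisectLeft lens c : Int) ≥ 2))

-- ===== PRECONDITION & SPEC =====
def Spec_filtering_course (orders : List String) (course : List Int) (out : List Int) : Prop := out = filtering_course_alt orders course
instance (orders : List String) (course : List Int) (out : List Int) : Decidable (Spec_filtering_course orders course out) := by unfold Spec_filtering_course; infer_instance

-- ===== CLAIM (what is proved, stated in full; the proofs are below) =====
def Claim_equal_filtering_course : Prop := ∀ (orders : List String) (course : List Int), Dom_filtering_course orders course → Spec_filtering_course orders course (filtering_course orders course)

-- ===== LEMMAS AND PROOFS =====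

-- 'del cur[k]' for a Nat index k equals List.eraseIdx (both leave cur unchanged
-- when k is out of range: pop? returns none, eraseIdx is the identity).
theorem pvDel_eq_eraseIdx {α : Type} (cur : List α) (k : Nat) :
    ((PySem.List.pop? cur (k : Int)).map Prod.snd).getD cur = cur.eraseIdx k := by
  by_cases h : k < cur.length
  · rw [PySem.List.pop?_natCast cur k h]; rfl
  · rw [List.eraseIdx_of_length_le (by omega)]
    have : PySem.List.pop? cur (k : Int) = none := by
      simp [PySem.List.pop?, PySem.List.pyIdx?]
      omega
    rw [this]; rfl

theorem pvErase_at_prefix {α : Type} (pre : List α) (x : α) (l : List α) :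
    (pre ++ x :: l).eraseIdx pre.length = pre ++ l := by
  induction pre with
  | nil => rfl
  | cons a t ih => simp [ih]

-- Deleting, from back to front, exactly the positions of `xs` (offset by the
-- prefix) whose element fails `p` leaves `pre ++ xs.filter p`.
theorem pvFoldrDel (p : Int → Bool) :
    ∀ (xs pre : List Int),
      ((((PySem.List.enumerate xs (pre.length : Int)).filter (fun ic => !p ic.2)).map (·.1)).foldr
        (fun idx cur => ((PySem.List.pop? cur idx).map Prod.snd).getD cur) (pre ++ xs))
      = pre ++ xs.filter p := by
  intro xs
  induction xs with
  | nil => intro pre; simp [PySem.List.enumerate]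
  | cons x rest ih =>
    intro pre
    have hs : ((pre.length : Int) + 1) = (((pre ++ [x]).length : Int)) := by simp
    rw [PySem.List.enumerate_cons]
    have ihx := ih (pre ++ [x])
    simp only [List.append_assoc, List.singleton_append] at ihx
    by_cases hp : p x = true
    · rw [List.filter_cons_of_neg (by simp [hp]), List.filter_cons_of_pos hp, hs, ihx]
    · have hp' : p x = false := by simpa using hp
      rw [List.filter_cons_of_pos (by simp [hp']), List.filter_cons_of_neg (by simp [hp']),
          List.map_cons, List.foldr_cons]
      dsimp only
      rw [hs, ihx]
      have := pvDel_eq_eraseIdx (pre ++ x :: rest.filter p) pre.length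
      rw [this, pvErase_at_prefix]

-- On a ≤-sorted list, length - bisectLeft counts the elements ≥ c.
theorem pvBisect_count (L : List Int) (c : Int)
    (hL : L.Pairwise (fun a b => a ≤ b)) :
    L.countP (fun el => el ≥ c) = L.length - PySem.List.bisectLeft L c := by
  obtain ⟨hk, hlt, hge⟩ := PySem.List.bisectLeft_spec L c hL
  set k := PySem.List.bisectLeft L c with hkdef
  have : L = L.take k ++ L.drop k := (List.take_append_drop k L).symm
  rw [this, List.countP_append]
  have h1 : (L.take k).countP (fun el => el ≥ c) = 0 := by
    rw [List.countP_eq_zero]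
    intro a ha
    obtain ⟨j, hj, rfl⟩ := List.mem_take_iff_getElem.mp ha
    have hjk : j < k := lt_of_lt_of_le hj (min_le_left _ _)
    have hjL : j < L.length := lt_of_lt_of_le hj (min_le_right _ _)
    simpa using not_le.mpr (hlt j hjL hjk)
  have h2 : (L.drop k).countP (fun el => el ≥ c) = (L.drop k).length := by
    rw [List.countP_eq_length]
    intro a ha
    obtain ⟨j, hj, rfl⟩ := List.mem_drop_iff_getElem.mp ha
    simpa using hge (k + j) (by omega) (by omega)
  rw [h1, h2]
  simp

-- ===== VERDICT (by name: the statement is the Claim_ definition above) =====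
theorem filtering_course_spec : Claim_equal_filtering_course := by
  intro orders course _
  unfold Spec_filtering_course filtering_course filtering_course_alt
  set lenOrders : List Int := orders.map (fun o => (PySem.Str.len o : Int)) with hlo
  set L : List Int := PySem.List.sorted lenOrders (fun x => x) false with hLdef
  have hLsorted : L.Pairwise (fun a b => a ≤ b) := by
    simpa using PySem.List.sorted_pairwise lenOrders (fun x => x)
  have hperm : L.Perm lenOrders := PySem.List.sorted_perm lenOrders (fun x => x) false
  -- the keep-predicate, shared by both sides
  set p : Int → Bool := fun c => decide ((L.length : Int) - (PySem.List.bisectLeft L c : Int) ≥ 2) with hp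
  -- A's test '¬(sum < 2)' is p
  have hcnt : ∀ c : Int,
      ((lenOrders.map (fun el => if el ≥ c then (1 : Int) else 0)).sum < 2) ↔ p c = false := by
    intro c
    have hsum := PySem.List.sum_map_ite_one_zero (fun el => decide (el ≥ c)) lenOrders
    have hcount : lenOrders.countP (fun el => el ≥ c) = L.length - PySem.List.bisectLeft L c := by
      rw [← hperm.countP_eq, pvBisect_count L c hLsorted]
    have hkle := (PySem.List.bisectLeft_spec L c hLsorted).1
    constructor
    · intro h
      simp only [hp, decide_eq_false_iff_not, not_le]
      simp only [ge_iff_le, decide_eq_true_eq] at hsum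
      rw [hsum, hcount] at h
      omega
    · intro h
      simp only [hp, decide_eq_false_iff_not, not_le] at h
      simp only [ge_iff_le, decide_eq_true_eq] at hsum
      rw [hsum, hcount]
      omega
  -- A's removeIdx = ascending positions (as Ints) whose element fails p
  dsimp only
  rw [PySem.List.foldl_append_ite
        (fun ic => ((lenOrders.map (fun el => if el ≥ ic.2 then (1 : Int) else 0)).sum < 2))
        (fun ic => ic.1) (PySem.List.enumerate course) []]
  have hfe : (PySem.List.enumerate course).filter
        (fun ic => decide ((lenOrders.map (fun el => if el ≥ ic.2 then (1 : Int) else 0)).sum < 2))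
      = (PySem.List.enumerate course).filter (fun ic => !p ic.2) := by
    apply List.filter_congr
    intro ic _
    by_cases h : p ic.2 = true
    · simp [h, (not_iff_not.mpr (hcnt ic.2)).mpr (by simp [h])]
    · have h' : p ic.2 = false := by simpa using h
      simp [h', (hcnt ic.2).mpr h']
  rw [hfe]
  set removeIdx : List Int :=
    ((PySem.List.enumerate course).filter (fun ic => !p ic.2)).map (·.1) with hri
  -- removeIdx is strictly increasing, so its reverse-sort is its reverse
  have hpw : removeIdx.Pairwise (fun a b => a < b) := by
    apply List.Pairwise.map
    · exact fun a b h => h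
    · exact (PySem.List.pairwise_lt_enumerate course 0).filter _
  have hsortrev : PySem.List.sorted ([] ++ removeIdx) (fun x => x) true = removeIdx.reverse := by
    rw [List.nil_append]
    exact PySem.List.sorted_rev_eq_of_perm_of_pairwise_gt removeIdx removeIdx.reverse
      (fun x => x) (List.reverse_perm removeIdx) (by simpa [List.pairwise_reverse] using hpw)
  rw [hsortrev, List.foldl_reverse]
  have := pvFoldrDel p course []
  simpa using this
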